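-- pv_equiv track=rewrite | github.com/madmaxieee/advent-of-code-2023 | python/day-11.py | expand_image
-- ===== SOURCE A (Python) =====
-- def expand_image(image: list[list[str]]):
--     new_image = []
--     empty_columns = {
--         i
--         for i in range(len(image[0]))
--         if all(image[j][i] == "." for j in range(len(image)))
--     }
--     for row in image:
--         new_row = []
--         for i in range(len(row)):
--             if i in empty_columns:
--                 new_row.append(row[i])
--             new_row.append(row[i])
--         new_image.append(new_row)
--         if all(c == "." for c in row):
--             new_image.append(new_row)
--     return new_image
-- ===== SOURCE B (Python) =====
-- def expand_image(image: list[list[str]]):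
--     # Different decomposition: duplicate all-dot rows first, then splice a copy of
--     # each all-dot column into every row by in-place insertion, right to left.
--     empty_cols = [i for i in range(len(image[0]))
--                   if all(i < len(r) and r[i] == "." for r in image)]
--     rows = []
--     for row in image:
--         rows.append(list(row))
--         if all(c == "." for c in row):
--             rows.append(list(row))
--     for row in rows:
--         for i in reversed(empty_cols):
--             if i < len(row):
--                 row.insert(i + 1, row[i])
--     return rows
-- ===== Notes on version B (the rewrite author's own statement) =====
-- stated objective: alternative
-- what changed: B first duplicates all-dot rows to build the expanded grid, then widens it by splicing a copy of each all-dot column into every row via in-place insertion right-to-left, instead of A's single pass that rebuilds each row cell by cell against a precomputed empty-column set.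
import Mathlib
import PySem

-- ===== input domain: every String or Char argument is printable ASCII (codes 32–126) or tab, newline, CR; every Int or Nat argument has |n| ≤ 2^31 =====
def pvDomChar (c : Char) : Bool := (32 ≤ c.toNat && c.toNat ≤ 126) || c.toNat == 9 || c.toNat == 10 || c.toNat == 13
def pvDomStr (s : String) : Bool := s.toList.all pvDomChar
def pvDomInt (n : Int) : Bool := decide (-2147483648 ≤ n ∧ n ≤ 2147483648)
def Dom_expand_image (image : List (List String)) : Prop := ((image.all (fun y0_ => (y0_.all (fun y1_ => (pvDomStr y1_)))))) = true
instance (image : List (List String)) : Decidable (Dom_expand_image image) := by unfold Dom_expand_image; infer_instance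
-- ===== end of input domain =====

-- B stages the work differently: it duplicates all-dot rows first and then widens
-- the grid by splicing a copy of each all-dot column into every row via
-- right-to-left in-place insertion (objective: alternative, same asymptotic cost).

-- ===== PORT A =====
def expand_image (image : List (List String)) : List (List String) :=
  let empty_columns : List Int :=
    (PySem.List.pyRange 0 (PySem.List.len ((PySem.List.pyGet? image 0).getD [])) 1).filter
      (fun i => (PySem.List.pyRange 0 (PySem.List.len image) 1).all
        (fun j => PySem.List.pyGetD (PySem.List.pyGetD image j []) i "" == "."))
  image.foldl (fun new_image rw =>
    let new_row := (PySem.List.pyRange 0 (PySem.List.len rw) 1).foldl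
      (fun nr i =>
        (if empty_columns.contains i then nr ++ [PySem.List.pyGetD rw i ""] else nr)
          ++ [PySem.List.pyGetD rw i ""]) []
    let new_image := new_image ++ [new_row]
    if rw.all (fun c => c == ".") then new_image ++ [new_row] else new_image) []

-- ===== PORT B =====
def expand_image_alt (image : List (List String)) : List (List String) :=
  let empty_cols : List Int :=
    (PySem.List.pyRange 0 (PySem.List.len ((PySem.List.pyGet? image 0).getD [])) 1).filter
      (fun i => image.all (fun r => decide (i < PySem.List.len r) && (PySem.List.pyGetD r i "" == ".")))
  let rows := image.foldl (fun acc rw =>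
    acc ++ (if rw.all (fun c => c == ".") then [rw, rw] else [rw])) []
  rows.map (fun rw =>
    empty_cols.reverse.foldl (fun r i =>
      if i < PySem.List.len r then PySem.List.insert r (i + 1) (PySem.List.pyGetD r i "")
      else r) rw)

-- ===== PRECONDITION & SPEC =====
-- Pre_ excludes exactly the inputs on which Python A raises IndexError: the empty
-- image (image[0]) and jagged images where the empty-column scan reads past the end
-- of a short row before meeting a non-dot cell.
def Pre_expand_image (image : List (List String)) : Prop :=
  image ≠ [] ∧ ∀ i < (image.headD []).length, ∀ j < image.length,
    (∀ k < j, i < (image.getD k []).length ∧ (image.getD k []).getD i "" = ".") →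
    i < (image.getD j []).length
instance (image : List (List String)) : Decidable (Pre_expand_image image) := by
  unfold Pre_expand_image; infer_instance
def pvWitness_expand_image : List (List String) := [[".", "#"], [".", "."]]
def Spec_expand_image (image : List (List String)) (out : List (List String)) : Prop := out = expand_image_alt image
instance (image : List (List String)) (out : List (List String)) : Decidable (Spec_expand_image image out) := by unfold Spec_expand_image; infer_instance

-- ===== CLAIM (what is proved, stated in full; the proofs are below) =====
def Claim_equal_expand_image : Prop := ∀ (image : List (List String)), Dom_expand_image image → Pre_expand_image image → Spec_expand_image image (expand_image image)

-- ===== LEMMAS AND PROOFS =====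

-- The two ports' empty-column predicates agree on nonnegative indices
-- (out-of-range pyGetD yields "", which is ≠ "."), so they filter the same list.
theorem empty_cols_eq (image : List (List String)) (w : Int) :
    (PySem.List.pyRange 0 w 1).filter
      (fun i => (PySem.List.pyRange 0 (PySem.List.len image) 1).all
        (fun j => PySem.List.pyGetD (PySem.List.pyGetD image j []) i "" == "."))
    = (PySem.List.pyRange 0 w 1).filter
      (fun i => image.all (fun r => decide (i < PySem.List.len r) && (PySem.List.pyGetD r i "" == "."))) := by
  apply List.filter_congr
  intro i hi
  have h0 : (0:Int) ≤ i := ((PySem.List.mem_pyRange_one).1 hi).1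
  have h := PySem.List.map_pyGetD_pyRange_zero' (xs := image) (d := ([] : List String))
  have hmap : ((PySem.List.pyRange 0 (PySem.List.len image) 1).all
        (fun j => PySem.List.pyGetD (PySem.List.pyGetD image j []) i "" == "."))
      = image.all (fun r => PySem.List.pyGetD r i "" == ".") := by
    conv_rhs => rw [← h]
    rw [List.all_map]
    rfl
  rw [hmap]
  refine List.all_congr rfl (fun r => ?_)
  by_cases hlen : i < PySem.List.len r
  · simp only [hlen, decide_true, Bool.true_and]
  · have hget : PySem.List.pyGetD r i "" = "" := by
      simp only [PySem.List.len_eq, not_lt] at hlen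
      simp [PySem.List.pyGetD, PySem.List.pyGet?, PySem.List.pyIdx?]
      split_ifs <;> first | rfl | (exfalso; omega)
    simp [hget]

-- the per-row expansion both ports compute, written as a flatMap
def dupRow (E : List Int) (rw : List String) : List String :=
  (PySem.List.enumerate rw).flatMap (fun p => if E.contains p.1 then [p.2, p.2] else [p.2])

-- A's inner loop builds exactly dupRow.
theorem a_row_eq (E : List Int) (rw : List String) :
    (PySem.List.pyRange 0 (PySem.List.len rw) 1).foldl
      (fun nr i =>
        (if E.contains i then nr ++ [PySem.List.pyGetD rw i ""] else nr)
          ++ [PySem.List.pyGetD rw i ""]) []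
    = dupRow E rw := by
  have hb : (fun (nr : List String) (i : Int) =>
      (if E.contains i then nr ++ [PySem.List.pyGetD rw i ""] else nr)
        ++ [PySem.List.pyGetD rw i ""])
      = fun nr i => nr ++ (if E.contains i then [PySem.List.pyGetD rw i "", PySem.List.pyGetD rw i ""] else [PySem.List.pyGetD rw i ""]) := by
    funext nr i
    split <;> simp
  rw [hb, PySem.List.foldl_append_eq_flatMap, dupRow,
    PySem.List.enumerate_eq_map_pyRange (d := "")]
  simp [List.flatMap_map]

-- indices at or beyond every element of P contribute single cells
theorem dupRow_none (P : List Int) (xs : List String) (s : Int)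
    (h : ∀ p ∈ P, p < s) :
    (PySem.List.enumerate xs s).flatMap
      (fun p => if P.contains p.1 then [p.2, p.2] else [p.2]) = xs := by
  have hc : ∀ q ∈ PySem.List.enumerate xs s, P.contains q.1 = false := by
    intro q hq
    obtain ⟨k, hk, rfl⟩ := (PySem.List.mem_enumerate_iff _ _ _).1 hq
    simp only [List.contains_eq_mem, decide_eq_false_iff_not]
    intro hmem
    have := h _ hmem
    omega
  calc (PySem.List.enumerate xs s).flatMap
        (fun p => if P.contains p.1 then [p.2, p.2] else [p.2])
      = (PySem.List.enumerate xs s).flatMap (fun p => [p.2]) := by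
        rw [List.flatMap, List.flatMap]
        refine congrArg List.flatten (List.map_congr_left ?_)
        intro q hq
        simpa using hc q hq
    _ = xs := by rw [← List.map_eq_flatMap, PySem.List.map_snd_enumerate]

-- indices below a bound don't touch the head element p in the contains test
theorem dupRow_cons_lt (P : List Int) (p : Int) (xs : List String) (s : Int)
    (h : ∀ (k : Nat), k < xs.length → s + (k : Int) ≠ p) :
    (PySem.List.enumerate xs s).flatMap
      (fun q => if (p :: P).contains q.1 then [q.2, q.2] else [q.2])
    = (PySem.List.enumerate xs s).flatMap
      (fun q => if P.contains q.1 then [q.2, q.2] else [q.2]) := by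
  rw [List.flatMap, List.flatMap]
  congr 1
  apply List.map_congr_left
  intro q hq
  obtain ⟨k, hk, rfl⟩ := (PySem.List.mem_enumerate_iff _ _ _).1 hq
  have hne : (s + (k : Int)) ≠ p := h k hk
  simp [hne]

-- inserting at positions strictly inside the left part leaves an appended tail alone
theorem foldl_insert_append (P : List Int) (a b : List String)
    (h : ∀ p ∈ P, 0 ≤ p ∧ p < PySem.List.len a) :
    P.foldl (fun r i =>
      if i < PySem.List.len r then PySem.List.insert r (i + 1) (PySem.List.pyGetD r i "")
      else r) (a ++ b)
    = P.foldl (fun r i =>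
      if i < PySem.List.len r then PySem.List.insert r (i + 1) (PySem.List.pyGetD r i "")
      else r) a ++ b := by
  induction P generalizing a with
  | nil => simp
  | cons p P ih =>
    obtain ⟨h0, hlt⟩ := h p (by simp)
    obtain ⟨n, rfl⟩ := Int.eq_ofNat_of_zero_le h0
    simp only [PySem.List.len_eq] at hlt
    have hn : n < a.length := by exact_mod_cast hlt
    have hga : PySem.List.pyGetD (a ++ b) (n : Int) "" = PySem.List.pyGetD a (n : Int) "" := by
      simp [PySem.List.pyGetD_natCast, List.getD_eq_getElem?_getD,
        List.getElem?_append_left hn]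
    have hguard1 : ((n : Int) < PySem.List.len (a ++ b)) := by
      simp only [PySem.List.len_eq, List.length_append]
      push_cast; omega
    have hguard2 : ((n : Int) < PySem.List.len a) := by
      simp only [PySem.List.len_eq]; exact_mod_cast hn
    have hcast : (n : Int) + 1 = ((n + 1 : Nat) : Int) := by push_cast; ring
    simp only [List.foldl_cons, if_pos hguard1, if_pos hguard2, hga, hcast]
    rw [PySem.List.insert_natCast _ _ _ (by simp only [List.length_append]; omega),
      PySem.List.insert_natCast _ _ _ (by omega),
      List.take_append_of_le_length (by omega),
      List.drop_append_of_le_length (by omega)]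
    rw [show a.take (n+1) ++ PySem.List.pyGetD a (n:Int) "" :: (a.drop (n+1) ++ b)
        = (a.take (n+1) ++ PySem.List.pyGetD a (n:Int) "" :: a.drop (n+1)) ++ b by simp]
    exact ih _ (fun q hq => by
      obtain ⟨hq0, hqlt⟩ := h q (by simp [hq])
      refine ⟨hq0, ?_⟩
      simp only [PySem.List.len_eq, List.length_append, List.length_cons,
        List.length_take, List.length_drop] at *
      omega)

-- B's right-to-left insertion loop builds exactly dupRow, for a strictly
-- decreasing list of nonnegative positions.
theorem b_row_eq (P : List Int) (rw : List String)
    (hsort : P.Pairwise (· > ·)) (hpos : ∀ p ∈ P, 0 ≤ p) :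
    P.foldl (fun r i =>
      if i < PySem.List.len r then PySem.List.insert r (i + 1) (PySem.List.pyGetD r i "")
      else r) rw
    = dupRow P rw := by
  induction P generalizing rw with
  | nil =>
    simp only [List.foldl_nil]
    exact (dupRow_none [] rw 0 (by simp)).symm
  | cons p P ih =>
    have hPp : ∀ q ∈ P, q < p := fun q hq => (List.pairwise_cons.1 hsort).1 q hq
    have hsort' := (List.pairwise_cons.1 hsort).2
    have hpos' : ∀ q ∈ P, 0 ≤ q := fun q hq => hpos q (by simp [hq])
    have hp0 : (0:Int) ≤ p := hpos p (by simp)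
    simp only [List.foldl_cons]
    by_cases hguard : (p < PySem.List.len rw)
    · obtain ⟨n, rfl⟩ := Int.eq_ofNat_of_zero_le hp0
      have hn : n < rw.length := by
        simp only [PySem.List.len_eq] at hguard; exact_mod_cast hguard
      have hcast : ((n:Int)) + 1 = ((n + 1 : Nat) : Int) := by push_cast; ring
      have hget : PySem.List.pyGetD rw (n : Int) "" = rw[n] := by
        simp [PySem.List.pyGetD_natCast, List.getD_eq_getElem?_getD,
          List.getElem?_eq_getElem hn]
      rw [if_pos hguard, hcast, PySem.List.insert_natCast _ _ _ (by omega), hget]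
      have htake : rw.take (n+1) = rw.take n ++ [rw[n]] := by
        rw [List.take_add_one, List.getElem?_eq_getElem hn, Option.toList_some]
      rw [htake, show rw.take n ++ [rw[n]] ++ rw[n] :: rw.drop (n+1)
          = rw.take n ++ (rw[n] :: rw[n] :: rw.drop (n+1)) by
        rw [List.append_assoc, List.singleton_append]]
      have hlen_take : (rw.take n).length = n := by
        simp only [List.length_take]; omega
      rw [foldl_insert_append P _ _ (fun q hq => by
        refine ⟨hpos' q hq, ?_⟩
        have := hPp q hq
        simp only [PySem.List.len_eq, hlen_take]
        omega)]
      rw [ih _ hsort' hpos']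
      conv_rhs => rw [dupRow, show rw = rw.take n ++ rw[n] :: rw.drop (n+1) by
        conv_lhs => rw [← List.take_append_drop n rw]
        rw [List.drop_eq_getElem_cons hn]]
      rw [PySem.List.enumerate_append, List.flatMap_append, hlen_take,
        PySem.List.enumerate_cons, List.flatMap_cons]
      rw [dupRow_cons_lt P (n:Int) (rw.take n) 0 (by
        intro k hk
        rw [hlen_take] at hk
        omega)]
      have h1 : (((n:Int) :: P).contains ((0:Int) + (n:Int))) = true := by
        simp
      rw [h1]
      rw [dupRow_none ((n:Int) :: P) (rw.drop (n+1)) ((0:Int) + (n:Int) + 1) (by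
        intro q hq
        rcases List.mem_cons.1 hq with rfl | hq'
        · omega
        · have := hPp q hq'
          omega)]
      simp [dupRow]
    · rw [if_neg hguard, ih _ hsort' hpos', dupRow, dupRow]
      refine (dupRow_cons_lt P p rw 0 ?_).symm
      intro k hk
      simp only [PySem.List.len_eq, not_lt] at hguard
      omega

-- the two ports agree (no precondition is needed for the Lean ports: pyGetD totalises
-- exactly the accesses Pre_ excludes in Python)
theorem ports_eq (image : List (List String)) :
    expand_image image = expand_image_alt image := by
  unfold expand_image expand_image_alt
  dsimp only
  rw [empty_cols_eq]
  set E : List Int := (PySem.List.pyRange 0 (PySem.List.len ((PySem.List.pyGet? image 0).getD [])) 1).filter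
      (fun i => image.all (fun r => decide (i < PySem.List.len r) && (PySem.List.pyGetD r i "" == "."))) with hE
  have hEs : E.Pairwise (· < ·) := List.Pairwise.filter _ (PySem.List.pairwise_lt_pyRange_one _ _)
  have hEpos : ∀ p ∈ E, (0:Int) ≤ p := fun p hp =>
    ((PySem.List.mem_pyRange_one).1 (List.mem_of_mem_filter hp)).1
  have hrevs : E.reverse.Pairwise (· > ·) := by
    rw [List.pairwise_reverse]
    exact hEs
  have hrevpos : ∀ p ∈ E.reverse, (0:Int) ≤ p := fun p hp => hEpos p (List.mem_reverse.1 hp)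
  have hg : ∀ rw : List String,
      E.reverse.foldl (fun r i =>
        if i < PySem.List.len r then PySem.List.insert r (i + 1) (PySem.List.pyGetD r i "")
        else r) rw
      = dupRow E rw := by
    intro rw
    rw [b_row_eq _ _ hrevs hrevpos]
    unfold dupRow
    simp
  rw [List.foldl_ext _ _ [] (fun acc rw _ => by
    simp only [a_row_eq]
    split <;> simp : ∀ acc rw, rw ∈ image → _ = acc ++ (if rw.all (fun c => c == ".") then [dupRow E rw, dupRow E rw] else [dupRow E rw]))]
  rw [PySem.List.foldl_append_eq_flatMap, PySem.List.foldl_append_eq_flatMap]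
  simp only [List.nil_append]
  rw [List.map_flatMap]
  refine congrArg (fun f => List.flatMap f image) (funext fun rw => ?_)
  split <;> simp only [List.map_cons, List.map_nil, hg]

-- ===== VERDICT (by name: the statement is the Claim_ definition above) =====

theorem expand_image_spec : Claim_equal_expand_image := by
  intro image _ _
  exact ports_eq image
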